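-- pv_equiv track=rewrite | github.com/eladkap/leetcode | main.py | mapSentence
-- ===== SOURCE A (Python) =====
-- def mapSentence(sentence: str) -> str:
--     d = {}
--     res = ''
--     m = 'a'
--     words = sentence.split()
--     for word in words:
--         if word not in d.keys():
--             d[word] = m
--             res += m
--             m = chr(ord(m) + 1)
--         else:
--             res += d[word]
--     return res
-- ===== SOURCE B (Python) =====
-- def mapSentence(sentence: str) -> str:
--     words = sentence.split()
--     out = [''] * len(words)
--     letter = ord('a')
--     for w in dict.fromkeys(words):
--         c = chr(letter)
--         for j in range(len(words)):
--             if words[j] == w: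
--                 out[j] = c
--         letter += 1
--     return ''.join(out)
-- ===== Notes on version B (the rewrite author's own statement) =====
-- stated objective: alternative
-- what changed: Inverts the traversal: instead of A's single fused pass that emits one letter per word while maintaining a dict and a running letter, B pre-allocates an output slot per word and then, for each DISTINCT word in first-occurrence order, scatters that word's letter into every position where it occurs (gather-per-word vs scatter-per-distinct-word).
import Mathlib
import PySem

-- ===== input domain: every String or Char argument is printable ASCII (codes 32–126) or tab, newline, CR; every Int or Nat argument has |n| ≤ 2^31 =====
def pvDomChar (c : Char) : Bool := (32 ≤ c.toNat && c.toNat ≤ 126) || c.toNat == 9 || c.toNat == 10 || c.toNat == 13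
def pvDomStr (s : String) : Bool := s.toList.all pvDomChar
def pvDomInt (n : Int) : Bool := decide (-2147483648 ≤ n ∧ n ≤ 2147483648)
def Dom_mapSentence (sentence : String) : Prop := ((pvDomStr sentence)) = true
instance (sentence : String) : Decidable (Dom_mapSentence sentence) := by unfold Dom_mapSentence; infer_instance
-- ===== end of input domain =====

-- B inverts the traversal: it allocates one output slot per word and, for each distinct word in
-- first-occurrence order, scatters that word's letter into every position where the word occurs,
-- instead of A's single fused pass (dict + running letter + string concatenation). Alternative
-- decomposition, no speed claim. In both ports the letters are carried as their code points
-- (ord m : Nat) and converted with Char.ofNat at the very end.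

-- ===== PORT A =====
-- A's loop state: d (the dict, letter stored as code point), res (output codes), m (= ord of the
-- current letter; `chr(ord(m)+1)` is `m+1`, `res += m` is `res ++ [m]`).
def mapSentenceLoop : List String → PySem.Dict String Nat → List Nat → Nat → List Nat
  | [], _, res, _ => res
  | w :: ws, d, res, m =>
    if d.contains w = false then
      mapSentenceLoop ws (d.insert w m) (res ++ [m]) (m + 1)
    else
      mapSentenceLoop ws d (res ++ [d.getD w 0]) m

def mapSentence (sentence : String) : String :=
  String.mk ((mapSentenceLoop (PySem.Str.split₀ sentence) PySem.Dict.empty [] 97).map Char.ofNat)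

-- ===== PORT B =====
-- inner loop `for j in range(len(words)): if words[j] == w: out[j] = c` — positionwise update
def placeLetter (w : String) (c : Nat) : List String → List Nat → List Nat
  | v :: vs, o :: os => (if v == w then c else o) :: placeLetter w c vs os
  | _, os => os

-- outer loop over the distinct words (dict.fromkeys order), letter = running code point
def mapAltLoop : List String → Nat → List String → List Nat → List Nat
  | [], _, _, out => out
  | w :: ds, letter, words, out => mapAltLoop ds (letter + 1) words (placeLetter w letter words out)

def mapSentence_alt (sentence : String) : String :=
  String.mk ((mapAltLoop (PySem.List.dedup (PySem.Str.split₀ sentence)) 97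
    (PySem.Str.split₀ sentence) ((PySem.Str.split₀ sentence).map fun _ => 0)).map Char.ofNat)

-- ===== PRECONDITION & SPEC =====
def Spec_mapSentence (sentence : String) (out : String) : Prop := out = mapSentence_alt sentence
instance (sentence : String) (out : String) : Decidable (Spec_mapSentence sentence out) := by unfold Spec_mapSentence; infer_instance

-- ===== CLAIM (what is proved, stated in full; the proofs are below) =====
def Claim_equal_mapSentence : Prop := ∀ (sentence : String), Dom_mapSentence sentence → Spec_mapSentence sentence (mapSentence sentence)

-- ===== LEMMAS AND PROOFS =====

-- A's loop produces, for each word, 97 + its first-occurrence index among the distinct words.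
lemma mapLoop_eq (ws : List String) :
    ∀ (d : PySem.Dict String Nat) (seen : List String) (res : List Nat),
    (∀ w, d.get? w = (PySem.List.index? seen w).map (fun i => 97 + i)) →
    mapSentenceLoop ws d res (97 + seen.length) =
      res ++ ws.map (fun w => 97 + (PySem.List.index? (PySem.Set.update seen ws) w).getD 0) := by
  induction ws with
  | nil => intro d seen res hd; simp [mapSentenceLoop]
  | cons w ws ih =>
    intro d seen res hd
    rw [PySem.Set.update_cons]
    by_cases hw : w ∈ seen
    · have hadd : PySem.Set.add seen w = seen := by
        simp [PySem.Set.add, PySem.Set.contains, hw]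
      rw [hadd]
      obtain ⟨i, hi⟩ : ∃ i, PySem.List.index? seen w = some i :=
        Option.isSome_iff_exists.mp ((PySem.List.index?_isSome_iff seen w).mpr hw)
      have hcw : d.contains w = true := by
        rw [PySem.Dict.contains_eq_isSome_get?, hd w, hi]; rfl
      have hidx : PySem.List.index? (PySem.Set.update seen ws) w = some i := by
        rw [PySem.Set.update_eq_append_filter, PySem.List.index?_append_of_mem _ hw, hi]
      simp only [mapSentenceLoop, hcw, Bool.true_eq_false, if_false]
      rw [PySem.Dict.getD, hd w, hi]
      rw [ih d seen _ hd, List.map_cons, hidx]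
      simp
    · have hadd : PySem.Set.add seen w = seen ++ [w] := by
        simp [PySem.Set.add, PySem.Set.contains, hw]
      rw [hadd]
      have hnone : PySem.List.index? seen w = none :=
        (PySem.List.index?_eq_none_iff seen w).mpr hw
      have hcw : d.contains w = false := by
        rw [PySem.Dict.contains_eq_isSome_get?, hd w, hnone]; rfl
      have hidxw : PySem.List.index? (seen ++ [w]) w = some seen.length :=
        PySem.List.index?_append_singleton_self seen w hw
      have hd' : ∀ v, (d.insert w (97 + seen.length)).get? v =
          (PySem.List.index? (seen ++ [w]) v).map (fun i => 97 + i) := by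
        intro v
        by_cases hv : v = w
        · subst hv
          rw [PySem.Dict.get?_insert_self, hidxw]
          rfl
        · rw [PySem.Dict.get?_insert_of_ne d _ hv, hd v]
          by_cases hvs : v ∈ seen
          · rw [PySem.List.index?_append_of_mem _ hvs]
          · have h1 : PySem.List.index? seen v = none :=
              (PySem.List.index?_eq_none_iff seen v).mpr hvs
            have h2 : PySem.List.index? (seen ++ [w]) v = none := by
              rw [PySem.List.index?_eq_none_iff]
              simp [hvs, hv]
            rw [h1, h2]
      have hidx : PySem.List.index? (PySem.Set.update (seen ++ [w]) ws) w = some seen.length := by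
        rw [PySem.Set.update_eq_append_filter,
            PySem.List.index?_append_of_mem _ (by simp : w ∈ seen ++ [w]), hidxw]
      simp only [mapSentenceLoop, hcw]
      have harith : 97 + seen.length + 1 = 97 + (seen ++ [w]).length := by
        simp; omega
      rw [harith, ih (d.insert w (97 + seen.length)) (seen ++ [w]) _ hd',
          List.map_cons, hidx]
      simp

-- B's inner scatter pass, positionwise.
lemma placeLetter_eq (w : String) (c : Nat) :
    ∀ (words : List String) (out : List Nat), out.length = words.length →
    placeLetter w c words out = List.zipWith (fun v o => if v = w then c else o) words out := by
  intro words
  induction words with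
  | nil => intro out h; cases out <;> simp_all [placeLetter]
  | cons v vs ih =>
    intro out h
    cases out with
    | nil => simp at h
    | cons o os =>
      simp only [placeLetter, List.zipWith, beq_iff_eq]
      rw [ih os (by simpa using h)]

lemma zipWith_zipWith_shared {α β : Type} (f g : α → β → β) (l : List α) :
    ∀ (l' : List β),
    List.zipWith f l (List.zipWith g l l') = List.zipWith (fun a b => f a (g a b)) l l' := by
  induction l with
  | nil => intro l'; simp
  | cons a l ih =>
    intro l'
    cases l' <;> simp [ih]

-- B's outer loop: after scattering all of ds, position j holds letter + index of words[j] in ds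
-- (its previous content where words[j] ∉ ds).
lemma mapAltLoop_eq (words : List String) :
    ∀ (ds : List String) (letter : Nat) (out : List Nat), ds.Nodup → out.length = words.length →
    mapAltLoop ds letter words out =
      List.zipWith (fun v o => ((PySem.List.index? ds v).map (fun i => letter + i)).getD o)
        words out := by
  intro ds
  induction ds with
  | nil =>
    intro letter out _ h
    have hfun : (fun (v : String) (o : Nat) =>
        ((PySem.List.index? ([] : List String) v).map (fun i => letter + i)).getD o) =
        fun _ o => o := by
      funext v o
      rw [(PySem.List.index?_eq_none_iff [] v).mpr (by simp)]
      rfl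
    simp only [mapAltLoop, hfun]
    induction words generalizing out with
    | nil => cases out <;> simp_all
    | cons v vs ih =>
      cases out with
      | nil => simp at h
      | cons o os =>
        simp only [List.zipWith, List.cons.injEq]
        exact ⟨trivial, ih os (by simpa using h)⟩
  | cons w ds ih =>
    intro letter out hnd h
    have hw : w ∉ ds := (List.nodup_cons.mp hnd).1
    simp only [mapAltLoop]
    rw [placeLetter_eq w letter words out h,
        ih (letter + 1) _ (List.nodup_cons.mp hnd).2
          (by rw [List.length_zipWith, h]; simp),
        zipWith_zipWith_shared]
    congr 1
    funext v o
    by_cases hv : v = w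
    · subst hv
      rw [PySem.List.index?_cons_self,
          (PySem.List.index?_eq_none_iff ds v).mpr hw]
      simp
    · rw [PySem.List.index?_cons_of_ne _ (fun h => hv h.symm)]
      cases hi : PySem.List.index? ds v <;> simp [hv, Nat.add_assoc, Nat.add_comm 1]

-- ===== VERDICT (by name: the statement is the Claim_ definition above) =====
theorem mapSentence_spec : Claim_equal_mapSentence := by
  unfold Claim_equal_mapSentence Spec_mapSentence
  intro s _
  unfold mapSentence mapSentence_alt
  have hempty : ∀ w : String, (PySem.Dict.empty (κ := String) (ν := Nat)).get? w =
      (PySem.List.index? ([] : List String) w).map (fun i => 97 + i) := by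
    intro w; simp [PySem.Dict.empty, PySem.Dict.get?, PySem.List.index?]
  have hA := mapLoop_eq (PySem.Str.split₀ s) PySem.Dict.empty [] [] hempty
  simp only [List.length_nil, Nat.add_zero, List.nil_append] at hA
  have hupd : PySem.Set.update ([] : List String) (PySem.Str.split₀ s) =
      PySem.List.dedup (PySem.Str.split₀ s) := by
    simp [PySem.Set.update_nil_left]
  rw [hA, hupd]
  rw [mapAltLoop_eq (PySem.Str.split₀ s) (PySem.List.dedup (PySem.Str.split₀ s)) 97
        _ (PySem.List.nodup_dedup _) (by simp)]
  congr 1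
  rw [List.zipWith_map_right, List.zipWith_self, List.map_map, List.map_map]
  apply List.map_congr_left
  intro v hv
  simp only [Function.comp]
  obtain ⟨i, hi⟩ : ∃ i, PySem.List.index? (PySem.List.dedup (PySem.Str.split₀ s)) v = some i :=
    Option.isSome_iff_exists.mp
      ((PySem.List.index?_isSome_iff _ v).mpr ((PySem.List.mem_dedup _ _).mpr hv))
  rw [hi]; rfl
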